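-- pv_equiv track=rewrite | github.com/Intellexus-DSI/sensim | utils.py | reorder_dict_keys
-- ===== SOURCE A (Python) =====
-- def reorder_dict_keys(d, keyword='filename'):
--     """
--     Reorder dictionary keys so that all keys containing 'keyword'
--     are sorted alphabetically and placed starting from the first
--     keyword key's position.
--     """
--     all_keys = list(d.keys())
--     keyword_keys = [k for k in all_keys if keyword.lower() in str(k).lower()]
--
--     if not keyword_keys:
--         return d
--
--     first_idx = min(all_keys.index(k) for k in keyword_keys)
--     other_keys = [k for k in all_keys if keyword.lower() not in str(k).lower()]
--
--     new_order = (
--             other_keys[:first_idx] +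
--             sorted(keyword_keys) +
--             other_keys[first_idx:]
--     )
--
--     return {k: d[k] for k in new_order}
-- ===== SOURCE B (Python) =====
-- def reorder_dict_keys(d, keyword='filename'):
--     """Single pass: copy non-keyword keys in order; at the first keyword key
--     splice in the whole sorted keyword block; skip later keyword keys."""
--     kw = keyword.lower()
--     block = sorted(k for k in d if kw in str(k).lower())
--     if not block:
--         return d
--     result = {}
--     inserted = False
--     for k, v in d.items():
--         if kw in str(k).lower():
--             if not inserted:
--                 for bk in block:
--                     result[bk] = d[bk]
--                 inserted = True
--         else:
--             result[k] = v
--     return result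
-- ===== Notes on version B (the rewrite author's own statement) =====
-- stated objective: faster
-- what changed: A computes the splice point by min over repeated list.index scans (quadratic) and rebuilds the order from two slices of the non-keyword keys; B pre-sorts the keyword keys once and does a single linear pass over the dict, copying non-keyword keys and splicing the whole sorted block in at the first keyword key.
import Mathlib
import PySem

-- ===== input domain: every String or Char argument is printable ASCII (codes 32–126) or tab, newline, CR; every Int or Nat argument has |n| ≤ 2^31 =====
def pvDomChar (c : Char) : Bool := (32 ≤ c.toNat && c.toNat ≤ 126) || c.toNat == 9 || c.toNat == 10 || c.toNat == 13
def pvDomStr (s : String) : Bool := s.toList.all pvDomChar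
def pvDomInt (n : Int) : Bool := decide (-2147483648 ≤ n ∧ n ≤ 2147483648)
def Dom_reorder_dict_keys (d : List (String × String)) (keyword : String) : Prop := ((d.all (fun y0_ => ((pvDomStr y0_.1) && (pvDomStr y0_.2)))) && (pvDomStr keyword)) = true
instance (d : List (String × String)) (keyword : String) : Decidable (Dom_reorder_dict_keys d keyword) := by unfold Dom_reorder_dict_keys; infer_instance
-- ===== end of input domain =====

-- B replaces A's quadratic index/min/slice splicing by a single linear pass over the dict that
-- emits the pre-sorted keyword block at the first keyword key (objective: faster, measured).

-- ===== PORT A =====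
-- The Python parameter is a dict: the assoc list is read through PySem.Dict.ofList (Python dict
-- construction semantics: first position, last value on duplicate keys).
def reorder_dict_keys (d : List (String × String)) (keyword : String) : List (String × String) :=
  let dd := PySem.Dict.ofList d
  let all_keys := dd.keys
  let keyword_keys := all_keys.filter (fun k =>
    PySem.Str.isIn (PySem.Str.lower keyword) (PySem.Str.lower k))
  if keyword_keys.isEmpty then dd.items
  else
    -- min(all_keys.index(k) for k in keyword_keys): each k is drawn from all_keys, so
    -- list.index never raises (the .getD 0 default is never taken), and the generator is
    -- nonempty, so min never raises (its .getD 0 default is never taken) — exact.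
    let first_idx : Int :=
      ((PySem.List.min? (keyword_keys.map (fun k =>
          ((PySem.List.index? all_keys k).getD 0 : Nat))) (fun i => i)).getD 0 : Nat)
    let other_keys := all_keys.filter (fun k =>
      !(PySem.Str.isIn (PySem.Str.lower keyword) (PySem.Str.lower k)))
    let new_order :=
      PySem.List.slice other_keys none (some first_idx) ++
      PySem.List.sorted keyword_keys (fun k => k) ++
      PySem.List.slice other_keys (some first_idx) none
    -- {k: d[k] for k in new_order}; every k of new_order is a key of dd, so d[k] never
    -- raises (the .getD "" default is never taken) — exact.
    (new_order.foldl (fun acc k => acc.insert k (dd.getD k "")) PySem.Dict.empty).items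

-- ===== PORT B =====
def reorder_dict_keys_alt (d : List (String × String)) (keyword : String) : List (String × String) :=
  let dd := PySem.Dict.ofList d
  let kw := PySem.Str.lower keyword
  let block := PySem.List.sorted
    (dd.keys.filter (fun k => PySem.Str.isIn kw (PySem.Str.lower k))) (fun k => k)
  if block.isEmpty then dd.items
  else
    -- one pass over d.items with a (result, inserted) state
    (dd.items.foldl (fun (st : PySem.Dict String String × Bool) kv =>
        if PySem.Str.isIn kw (PySem.Str.lower kv.1) then
          if st.2 then st
          else (block.foldl (fun acc bk => acc.insert bk (dd.getD bk "")) st.1, true)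
        else (st.1.insert kv.1 kv.2, st.2))
      (PySem.Dict.empty, false)).1.items

-- ===== PRECONDITION & SPEC =====
def Spec_reorder_dict_keys (d : List (String × String)) (keyword : String) (out : List (String × String)) : Prop := out = reorder_dict_keys_alt d keyword
instance (d : List (String × String)) (keyword : String) (out : List (String × String)) : Decidable (Spec_reorder_dict_keys d keyword out) := by unfold Spec_reorder_dict_keys; infer_instance

-- ===== CLAIM (what is proved, stated in full; the proofs are below) =====
def Claim_equal_reorder_dict_keys : Prop := ∀ (d : List (String × String)) (keyword : String), Dom_reorder_dict_keys d keyword → Spec_reorder_dict_keys d keyword (reorder_dict_keys d keyword)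

-- ===== LEMMAS AND PROOFS =====

theorem foldB_false (pred : String → Bool) (ddv : String → String)
    (block : List String)
    (l : List (String × String)) (h : ∀ kv ∈ l, pred kv.1 = false)
    (acc : PySem.Dict String String) :
    l.foldl (fun (st : PySem.Dict String String × Bool) kv =>
        if pred kv.1 then
          if st.2 then st
          else (block.foldl (fun acc bk => acc.insert bk (ddv bk)) st.1, true)
        else (st.1.insert kv.1 kv.2, st.2))
      (acc, false)
    = (l.foldl (fun a kv => a.insert kv.1 kv.2) acc, false) := by
  induction l generalizing acc with
  | nil => rfl
  | cons kv t ih =>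
    have hk := h kv (by simp)
    simp only [List.foldl_cons, hk, Bool.false_eq_true, if_false]
    exact ih (fun x hx => h x (by simp [hx])) _

theorem foldB_true (pred : String → Bool) (ddv : String → String)
    (block : List String)
    (l : List (String × String)) (acc : PySem.Dict String String) :
    l.foldl (fun (st : PySem.Dict String String × Bool) kv =>
        if pred kv.1 then
          if st.2 then st
          else (block.foldl (fun acc bk => acc.insert bk (ddv bk)) st.1, true)
        else (st.1.insert kv.1 kv.2, st.2))
      (acc, true)
    = ((l.filter (fun kv => !pred kv.1)).foldl (fun a kv => a.insert kv.1 kv.2) acc, true) := by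
  induction l generalizing acc with
  | nil => rfl
  | cons kv t ih =>
    by_cases h : pred kv.1 = true
    · simp only [List.foldl_cons, List.filter_cons, h, if_true, Bool.not_true,
        Bool.false_eq_true, if_false, ih]
    · simp only [Bool.not_eq_true] at h
      simp only [List.foldl_cons, List.filter_cons, h, Bool.false_eq_true, if_false,
        Bool.not_false, if_true, ih]

theorem min_index_eq (p : String → Bool) (tw rest : List String) (e : String)
    (htw : ∀ x ∈ tw, p x = false) (he : p e = true) :
    PySem.List.min? (((tw ++ e :: rest).filter p).map (fun k =>
        ((PySem.List.index? (tw ++ e :: rest) k).getD 0 : Nat))) (fun i => i)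
      = some tw.length := by
  set keys := tw ++ e :: rest with hkeys
  have hmemE : e ∈ keys.filter p := by
    simp [hkeys, List.mem_filter, he]
  have hje : PySem.List.index? keys e = some tw.length := by
    rw [PySem.List.index?_eq_some_iff]
    exact ⟨tw, rest, rfl, rfl, fun hmem => by simp [htw e hmem] at he⟩
  have hlb : ∀ i ∈ (keys.filter p).map (fun k => ((PySem.List.index? keys k).getD 0 : Nat)),
      tw.length ≤ i := by
    intro i hi
    obtain ⟨k, hk, rfl⟩ := List.mem_map.mp hi
    obtain ⟨hkmem, hpk⟩ := List.mem_filter.mp hk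
    obtain ⟨m, hm⟩ := Option.isSome_iff_exists.mp ((PySem.List.index?_isSome_iff _ _).mpr hkmem)
    obtain ⟨hlt, hget, -⟩ := PySem.List.getElem_of_index?_eq_some hm
    rw [hm, Option.getD_some]
    by_contra hc
    push Not at hc
    have hmtw : m < tw.length := hc
    have : keys[m] = tw[m]'hmtw := List.getElem_append_left hmtw
    have : p k = false := by
      rw [← hget, this]; exact htw _ (List.getElem_mem hmtw)
    simp [this] at hpk
  have hne : (keys.filter p).map (fun k => ((PySem.List.index? keys k).getD 0 : Nat)) ≠ [] := by
    simp only [ne_eq, List.map_eq_nil_iff]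
    intro h
    rw [h] at hmemE; exact absurd hmemE (List.not_mem_nil)
  have hsome : (PySem.List.min? ((keys.filter p).map (fun k =>
      ((PySem.List.index? keys k).getD 0 : Nat))) (fun i => i)).isSome := by
    rw [Option.isSome_iff_ne_none]
    intro h
    exact hne ((PySem.List.min?_eq_none_iff _ _).mp h)
  obtain ⟨m0, hm0⟩ := Option.isSome_iff_exists.mp hsome
  have hm0mem := PySem.List.min?_mem hm0
  have hmin := PySem.List.min?_isMin hm0
  have h1 : tw.length ≤ m0 := hlb _ hm0mem
  have h2 : m0 ≤ tw.length := by
    have : tw.length ∈ (keys.filter p).map (fun k => ((PySem.List.index? keys k).getD 0 : Nat)) := by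
      refine List.mem_map.mpr ⟨e, hmemE, ?_⟩
      rw [hje, Option.getD_some]
    exact hmin _ this
  rw [hm0, Nat.le_antisymm h2 h1]

theorem core (pred : String → Bool) (dd : PySem.Dict String String) (hnd : dd.keys.Nodup) :
    (if (dd.keys.filter pred).isEmpty = true then dd.items
     else (List.foldl (fun acc k => acc.insert k (dd.getD k "")) PySem.Dict.empty
        (PySem.List.slice (dd.keys.filter (fun k => !pred k)) none
            (some (((PySem.List.min? ((dd.keys.filter pred).map (fun k =>
                ((PySem.List.index? dd.keys k).getD 0 : Nat))) (fun i => i)).getD 0 : Nat) : Int)) ++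
          PySem.List.sorted (dd.keys.filter pred) (fun k => k) ++
          PySem.List.slice (dd.keys.filter (fun k => !pred k))
            (some (((PySem.List.min? ((dd.keys.filter pred).map (fun k =>
                ((PySem.List.index? dd.keys k).getD 0 : Nat))) (fun i => i)).getD 0 : Nat) : Int))
            none)).items)
    = (if (PySem.List.sorted (dd.keys.filter pred) (fun k => k)).isEmpty = true then dd.items
       else (dd.items.foldl (fun (st : PySem.Dict String String × Bool) kv =>
          if pred kv.1 then
            if st.2 then st
            else ((PySem.List.sorted (dd.keys.filter pred) (fun k => k)).foldl
                (fun acc bk => acc.insert bk (dd.getD bk "")) st.1, true)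
          else (st.1.insert kv.1 kv.2, st.2)) (PySem.Dict.empty, false)).1.items) := by
  by_cases hemp : (dd.keys.filter pred).isEmpty = true
  · have hs : (PySem.List.sorted (dd.keys.filter pred) (fun k => k)).isEmpty = true := by
      rw [List.isEmpty_iff] at hemp ⊢
      rw [PySem.List.sorted_eq_nil_iff]
      exact hemp
    rw [if_pos hemp, if_pos hs]
  · have hne : dd.keys.filter pred ≠ [] := by
      intro h; exact hemp (by rw [h]; rfl)
    have hs : ¬ (PySem.List.sorted (dd.keys.filter pred) (fun k => k)).isEmpty = true := by
      intro h
      rw [List.isEmpty_iff, PySem.List.sorted_eq_nil_iff] at h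
      exact hne h
    rw [if_neg hemp, if_neg hs]
    -- decompose keys at the first pred-key
    have hsplit := List.takeWhile_append_dropWhile (p := fun k => !pred k) (l := dd.keys)
    cases hdw : dd.keys.dropWhile (fun k => !pred k) with
    | nil =>
      exfalso
      apply hne
      rw [List.filter_eq_nil_iff]
      intro a ha
      have h1 : dd.keys = dd.keys.takeWhile (fun k => !pred k) := by
        conv_lhs => rw [← hsplit]
        rw [hdw, List.append_nil]
      rw [h1] at ha
      have h2 := List.mem_takeWhile_imp ha
      simp only [Bool.not_eq_eq_eq_not, Bool.not_true] at h2
      simp [h2]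
    | cons e' rest =>
      have hkeys : dd.keys = dd.keys.takeWhile (fun k => !pred k) ++ e' :: rest := by
        conv_lhs => rw [← hsplit]
        rw [hdw]
      have htw : ∀ x ∈ dd.keys.takeWhile (fun k => !pred k), pred x = false := by
        intro x hx
        have h2 := List.mem_takeWhile_imp hx
        simpa using h2
      have he' : pred e' = true := by
        have hne' : dd.keys.dropWhile (fun k => !pred k) ≠ [] := by rw [hdw]; simp
        have h0 := List.head_dropWhile_not (fun k => !pred k) hne'
        simp only [hdw, List.head_cons] at h0
        simpa using h0
      rw [hkeys]
      rw [min_index_eq pred _ rest e' htw he', Option.getD_some]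
      rw [PySem.List.slice_to_natCast, PySem.List.slice_from_natCast]
      have hother : (dd.keys.takeWhile (fun k => !pred k) ++ e' :: rest).filter (fun k => !pred k)
          = dd.keys.takeWhile (fun k => !pred k) ++ rest.filter (fun k => !pred k) := by
        rw [List.filter_append, List.filter_cons]
        rw [List.filter_eq_self.mpr (fun x hx => by simp [htw x hx])]
        simp [he']
      rw [hother, List.take_left, List.drop_left]
      have hnd' : (dd.keys.takeWhile (fun k => !pred k) ++ e' :: rest).Nodup := by
        rw [← hkeys]; exact hnd
      have hfilterTW : (dd.keys.takeWhile (fun k => !pred k) ++ e' :: rest).filter pred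
          = e' :: rest.filter pred := by
        rw [List.filter_append, List.filter_cons]
        rw [List.filter_eq_nil_iff.mpr (fun x hx => by simp [htw x hx])]
        simp [he']
      have hpermB : (PySem.List.sorted ((dd.keys.takeWhile (fun k => !pred k) ++ e' :: rest).filter pred) (fun k => k)).Perm
          (e' :: rest.filter pred) := by
        refine (PySem.List.sorted_perm _ _ _).trans ?_
        rw [hfilterTW]
      have hpermAll : ((dd.keys.takeWhile (fun k => !pred k) ++
          (PySem.List.sorted ((dd.keys.takeWhile (fun k => !pred k) ++ e' :: rest).filter pred) (fun k => k) ++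
            rest.filter (fun k => !pred k)))).Perm
          (dd.keys.takeWhile (fun k => !pred k) ++ e' :: rest) := by
        apply List.Perm.append_left
        refine (hpermB.append_right _).trans ?_
        rw [List.cons_append]
        exact (List.filter_append_perm pred rest).cons e'
      have hnodAll : ((dd.keys.takeWhile (fun k => !pred k) ++
          PySem.List.sorted ((dd.keys.takeWhile (fun k => !pred k) ++ e' :: rest).filter pred) (fun k => k)) ++
            rest.filter (fun k => !pred k)).Nodup := by
        rw [List.append_assoc]
        exact hpermAll.nodup_iff.mpr hnd'
      -- A-side: the dict comprehension over new_order is a map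
      have hA := PySem.Dict.items_foldl_insert_fresh
        (l := (dd.keys.takeWhile (fun k => !pred k) ++
            PySem.List.sorted ((dd.keys.takeWhile (fun k => !pred k) ++ e' :: rest).filter pred) (fun k => k)) ++
          rest.filter (fun k => !pred k))
        (k := fun a => a) (v := fun a => dd.getD a "") (d := PySem.Dict.empty)
        (fun a _ => by simp) (by simpa using hnodAll)
      have hA' : (List.foldl (fun acc k => acc.insert k (dd.getD k "")) PySem.Dict.empty
          ((dd.keys.takeWhile (fun k => !pred k) ++
            PySem.List.sorted ((dd.keys.takeWhile (fun k => !pred k) ++ e' :: rest).filter pred) (fun k => k)) ++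
          rest.filter (fun k => !pred k))).items
          = ((dd.keys.takeWhile (fun k => !pred k) ++
            PySem.List.sorted ((dd.keys.takeWhile (fun k => !pred k) ++ e' :: rest).filter pred) (fun k => k)) ++
          rest.filter (fun k => !pred k)).map (fun a => (a, dd.getD a "")) := by
        simpa using hA
      rw [hA']
      -- B-side: decompose dd.items along the same split
      have hkeysItems : dd.items.map Prod.fst = dd.keys := rfl
      have htwI : dd.keys.takeWhile (fun k => !pred k)
          = (dd.items.takeWhile (fun kv => !pred kv.1)).map Prod.fst := by
        rw [← hkeysItems, List.takeWhile_map]; rfl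
      have hdwI : dd.keys.dropWhile (fun k => !pred k)
          = (dd.items.dropWhile (fun kv => !pred kv.1)).map Prod.fst := by
        rw [← hkeysItems, List.dropWhile_map]; rfl
      cases hdrop : dd.items.dropWhile (fun kv => !pred kv.1) with
      | nil =>
        exfalso
        rw [hdrop, List.map_nil] at hdwI
        rw [hdwI] at hdw
        exact absurd hdw (by simp)
      | cons kvE restI =>
        rw [hdrop, List.map_cons] at hdwI
        rw [hdwI] at hdw
        obtain ⟨hkvE1, hrestI⟩ : kvE.1 = e' ∧ restI.map Prod.fst = rest := by
          have h := hdw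
          injection h with h1 h2
          exact ⟨h1, h2⟩
        have hitems : dd.items = dd.items.takeWhile (fun kv => !pred kv.1) ++ kvE :: restI := by
          conv_lhs => rw [← List.takeWhile_append_dropWhile (p := fun kv => !pred kv.1) (l := dd.items)]
          rw [hdrop]
        rw [hitems, List.foldl_append, List.foldl_cons]
        rw [foldB_false _ _ _ _ (fun kv hkv => by simpa using List.mem_takeWhile_imp hkv)]
        have hpkvE : pred kvE.1 = true := by rw [hkvE1]; exact he'
        simp only [hpkvE, if_true, Bool.false_eq_true, if_false]
        rw [foldB_true]
        dsimp only
        have hblockfold : ∀ acc : PySem.Dict String String,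
            (PySem.List.sorted ((dd.keys.takeWhile (fun k => !pred k) ++ e' :: rest).filter pred) (fun k => k)).foldl
              (fun acc bk => acc.insert bk (dd.getD bk "")) acc
            = ((PySem.List.sorted ((dd.keys.takeWhile (fun k => !pred k) ++ e' :: rest).filter pred) (fun k => k)).map
                (fun a => (a, dd.getD a ""))).foldl (fun a kv => a.insert kv.1 kv.2) acc := by
          intro acc
          rw [List.foldl_map]
        rw [hblockfold]
        have hmerge : (List.filter (fun kv => !pred kv.1) restI).foldl (fun a kv => a.insert kv.1 kv.2)
              (((PySem.List.sorted ((dd.keys.takeWhile (fun k => !pred k) ++ e' :: rest).filter pred) (fun k => k)).map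
                (fun a => (a, dd.getD a ""))).foldl (fun a kv => a.insert kv.1 kv.2)
                ((dd.items.takeWhile (fun kv => !pred kv.1)).foldl (fun a kv => a.insert kv.1 kv.2) PySem.Dict.empty))
            = ((dd.items.takeWhile (fun kv => !pred kv.1) ++
                (PySem.List.sorted ((dd.keys.takeWhile (fun k => !pred k) ++ e' :: rest).filter pred) (fun k => k)).map
                  (fun a => (a, dd.getD a "")) ++
                List.filter (fun kv => !pred kv.1) restI).foldl (fun a kv => a.insert kv.1 kv.2) PySem.Dict.empty) := by
          rw [List.foldl_append, List.foldl_append]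
        rw [hmerge]
        have hrestfst : (List.filter (fun kv => !pred kv.1) restI).map Prod.fst
            = List.filter (fun k => !pred k) rest := by
          rw [← hrestI, List.filter_map]; rfl
        have hcompid : (Prod.fst ∘ fun a : String => (a, dd.getD a "")) = id := rfl
        have hLfst : (dd.items.takeWhile (fun kv => !pred kv.1) ++
              (PySem.List.sorted ((dd.keys.takeWhile (fun k => !pred k) ++ e' :: rest).filter pred) (fun k => k)).map
                (fun a => (a, dd.getD a "")) ++
              List.filter (fun kv => !pred kv.1) restI).map Prod.fst
            = (dd.keys.takeWhile (fun k => !pred k) ++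
              PySem.List.sorted ((dd.keys.takeWhile (fun k => !pred k) ++ e' :: rest).filter pred) (fun k => k)) ++
              List.filter (fun k => !pred k) rest := by
          rw [List.map_append, List.map_append, List.map_map, hcompid, List.map_id,
            ← htwI, hrestfst]
        have hnodL : ((dd.items.takeWhile (fun kv => !pred kv.1) ++
              (PySem.List.sorted ((dd.keys.takeWhile (fun k => !pred k) ++ e' :: rest).filter pred) (fun k => k)).map
                (fun a => (a, dd.getD a "")) ++
              List.filter (fun kv => !pred kv.1) restI).map Prod.fst).Nodup := by
          rw [hLfst]; exact hnodAll
        have hB := PySem.Dict.items_foldl_insert_fresh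
          (l := dd.items.takeWhile (fun kv => !pred kv.1) ++
              (PySem.List.sorted ((dd.keys.takeWhile (fun k => !pred k) ++ e' :: rest).filter pred) (fun k => k)).map
                (fun a => (a, dd.getD a "")) ++
              List.filter (fun kv => !pred kv.1) restI)
          (k := Prod.fst) (v := Prod.snd) (d := PySem.Dict.empty)
          (fun a _ => by simp) hnodL
        have hB' : (List.foldl (fun a kv => a.insert kv.1 kv.2) PySem.Dict.empty
            (dd.items.takeWhile (fun kv => !pred kv.1) ++
              (PySem.List.sorted ((dd.keys.takeWhile (fun k => !pred k) ++ e' :: rest).filter pred) (fun k => k)).map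
                (fun a => (a, dd.getD a "")) ++
              List.filter (fun kv => !pred kv.1) restI)).items
            = dd.items.takeWhile (fun kv => !pred kv.1) ++
              (PySem.List.sorted ((dd.keys.takeWhile (fun k => !pred k) ++ e' :: rest).filter pred) (fun k => k)).map
                (fun a => (a, dd.getD a "")) ++
              List.filter (fun kv => !pred kv.1) restI := by
          simpa using hB
        rw [hB']
        -- final: map the values back onto the key order
        have hmapid : ∀ l : List (String × String), l.Sublist dd.items →
            l.map (fun kv => (kv.1, dd.getD kv.1 "")) = l := by
          intro l hsub
          refine (List.map_congr_left ?_).trans (List.map_id _)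
          intro kv hkv
          have hmem : (kv.1, kv.2) ∈ dd.items := by simpa using hsub.subset hkv
          have := PySem.Dict.getD_of_mem_items dd hmem hnd ""
          rw [this]; rfl
        rw [List.map_append, List.map_append]
        have hrestIsub : restI.Sublist dd.items := by
          rw [hitems]
          exact (List.sublist_cons_self kvE restI).trans (List.sublist_append_right _ _)
        congr 1
        · congr 1
          rw [htwI, List.map_map]
          exact hmapid _ (List.takeWhile_sublist _)
        · rw [← hrestfst, List.map_map]
          exact hmapid _ (List.filter_sublist.trans hrestIsub)


-- ===== VERDICT (by name: the statement is the Claim_ definition above) =====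
theorem reorder_dict_keys_spec : Claim_equal_reorder_dict_keys := by
  intro d keyword _
  unfold Spec_reorder_dict_keys reorder_dict_keys reorder_dict_keys_alt
  exact core (fun k => PySem.Str.isIn (PySem.Str.lower keyword) (PySem.Str.lower k))
    (PySem.Dict.ofList d) (PySem.Dict.nodup_keys_ofList d)
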